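-- pv_equiv track=rewrite | github.com/ttesileanu/advent-of-code | 2022/solve8.py | partial_max
-- ===== SOURCE A (Python) =====
-- from typing import List
--
-- def partial_max(heights: List[List[int]], edge: str) -> List[List[int]]:
--     """Find maximum height from the given edge."""
--     m = len(heights)
--     n = len(heights[0])
--
--     res = [n * [0] for _ in heights]
--
--     if edge in ["top", "bottom"]:
--         k1 = n
--         k2 = m
--     elif edge in ["left", "right"]:
--         k1 = m
--         k2 = n
--     else:
--         raise ValueError(f"unknown edge, {edge}")
--
--     for i1 in range(k1):
--         crt_max = -1
--         for i2 in range(k2):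
--             if edge == "top":
--                 i = i2
--                 j = i1
--             elif edge == "bottom":
--                 i = m - i2 - 1
--                 j = i1
--             elif edge == "left":
--                 i = i1
--                 j = i2
--             elif edge == "right":
--                 i = i1
--                 j = n - i2 - 1
--
--             res[i][j] = crt_max
--
--             height = heights[i][j]
--             crt_max = max(crt_max, height)
--
--     return res
-- ===== SOURCE B (Python) =====
-- from typing import List
--
--
-- def _scan(row: List[int]) -> List[int]:
--     """Exclusive running max along a row, starting from -1."""
--     out = []
--     crt = -1
--     for h in row:
--         out.append(crt)
--         crt = max(crt, h)
--     return out
--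
--
-- def _sweep(g: List[List[int]], n: int) -> List[List[int]]:
--     """Exclusive top-to-bottom running max per column; n = row width."""
--     out = []
--     crt = [-1] * n
--     for row in g:
--         out.append(crt)
--         crt = [max(c, h) for c, h in zip(crt, row)]
--     return out
--
--
-- def partial_max(heights: List[List[int]], edge: str) -> List[List[int]]:
--     """Find maximum height from the given edge."""
--     n = len(heights[0])
--     g = [row[:n] for row in heights]
--     if edge == "top":
--         return _sweep(g, n)
--     if edge == "bottom":
--         return _sweep(g[::-1], n)[::-1]
--     if edge == "left":
--         return [_scan(row) for row in g]
--     if edge == "right":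
--         return [_scan(row[::-1])[::-1] for row in g]
--     raise ValueError(f"unknown edge, {edge}")
-- ===== Notes on version B (the rewrite author's own statement) =====
-- stated objective: simpler
-- what changed: Replaces A's preallocated result matrix filled by index arithmetic over a 4-way-reoriented double loop with direct functional scans: per-row exclusive running max for left/right and a vectorized per-column running-max sweep (with list reversal) for top/bottom.
import Mathlib
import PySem

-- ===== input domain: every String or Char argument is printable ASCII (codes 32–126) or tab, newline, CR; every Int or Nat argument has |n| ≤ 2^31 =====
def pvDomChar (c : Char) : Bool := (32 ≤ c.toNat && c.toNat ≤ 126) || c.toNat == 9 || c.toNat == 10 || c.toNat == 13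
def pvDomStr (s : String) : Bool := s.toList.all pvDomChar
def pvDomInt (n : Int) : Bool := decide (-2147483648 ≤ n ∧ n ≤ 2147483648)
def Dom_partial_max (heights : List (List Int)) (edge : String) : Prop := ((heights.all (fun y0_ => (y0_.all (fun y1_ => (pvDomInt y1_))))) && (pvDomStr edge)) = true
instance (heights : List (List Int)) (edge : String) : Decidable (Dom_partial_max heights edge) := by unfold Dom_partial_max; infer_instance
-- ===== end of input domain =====

-- B replaces A's index-arithmetic fill of a preallocated matrix by direct row scans /
-- column sweeps; equal return value on Pre_ (neither mutates its arguments' observable value).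

-- ===== PORT A =====
-- res[i][j] = crt  (rows of res are independent lists, as in Python)
def set2d (res : List (List Int)) (i j : Nat) (v : Int) : List (List Int) :=
  res.set i ((res.getD i []).set j v)

-- the i, j computed from i1, i2 by A's if/elif chain (last branch = "right"; an
-- invalid edge never reaches the loop in Python)
def idxA (edge : String) (m n i1 i2 : Nat) : Nat × Nat :=
  if edge == "top" then (i2, i1)
  else if edge == "bottom" then (m - i2 - 1, i1)
  else if edge == "left" then (i1, i2)
  else (i1, n - i2 - 1)

-- body of A's inner loop: res[i][j] = crt_max; crt_max = max(crt_max, heights[i][j])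
def innerA (heights : List (List Int)) (edge : String) (m n i1 : Nat)
    (st : List (List Int) × Int) (i2 : Nat) : List (List Int) × Int :=
  let ij := idxA edge m n i1 i2
  (set2d st.1 ij.1 ij.2 st.2, max st.2 ((heights.getD ij.1 []).getD ij.2 0))

def partial_max (heights : List (List Int)) (edge : String) : List (List Int) :=
  let m := heights.length
  let n := (heights.headD []).length   -- len(heights[0]); IndexError on [] is outside Pre_
  let res0 := heights.map (fun _ => List.replicate n 0)
  let k := if edge == "top" || edge == "bottom" then (n, m)
           else if edge == "left" || edge == "right" then (m, n)
           else (0, 0)                 -- ValueError in Python, outside Pre_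
  (List.range k.1).foldl
    (fun res i1 => ((List.range k.2).foldl (innerA heights edge m n i1) (res, -1)).1)
    res0

-- ===== PORT B =====
-- exclusive running max along a row, starting from -1
def scanB (row : List Int) : List Int :=
  (row.foldl (fun (acc : List Int × Int) h => (acc.1 ++ [acc.2], max acc.2 h)) ([], -1)).1

-- exclusive top-to-bottom running max per column; n = row width
def sweepB (g : List (List Int)) (n : Nat) : List (List Int) :=
  (g.foldl (fun (acc : List (List Int) × List Int) row =>
      (acc.1 ++ [acc.2], List.zipWith max acc.2 row))
    ([], List.replicate n (-1))).1

def partial_max_alt (heights : List (List Int)) (edge : String) : List (List Int) :=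
  let n := (heights.headD []).length
  let g := heights.map (fun row => row.take n)
  if edge == "top" then sweepB g n
  else if edge == "bottom" then (sweepB g.reverse n).reverse
  else if edge == "left" then g.map scanB
  else if edge == "right" then g.map (fun row => (scanB row.reverse).reverse)
  else []                              -- ValueError in Python, outside Pre_

-- ===== PRECONDITION & SPEC =====
-- exactly the inputs on which Python A returns: a nonempty grid whose first row is no
-- longer than any row (else IndexError) and a known edge name (else ValueError)
def Pre_partial_max (heights : List (List Int)) (edge : String) : Prop :=
  heights ≠ [] ∧ (∀ row ∈ heights, (heights.headD []).length ≤ row.length) ∧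
  (edge = "top" ∨ edge = "bottom" ∨ edge = "left" ∨ edge = "right")
instance (heights : List (List Int)) (edge : String) : Decidable (Pre_partial_max heights edge) := by
  unfold Pre_partial_max; infer_instance

def pvWitness_partial_max : List (List Int) × String := ([[3, 1], [2, 5]], "top")

def Spec_partial_max (heights : List (List Int)) (edge : String) (out : List (List Int)) : Prop := out = partial_max_alt heights edge
instance (heights : List (List Int)) (edge : String) (out : List (List Int)) : Decidable (Spec_partial_max heights edge out) := by unfold Spec_partial_max; infer_instance

-- ===== CLAIM (what is proved, stated in full; the proofs are below) =====
def Claim_equal_partial_max : Prop := ∀ (heights : List (List Int)) (edge : String), Dom_partial_max heights edge → Pre_partial_max heights edge → Spec_partial_max heights edge (partial_max heights edge)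

-- ===== LEMMAS AND PROOFS =====

def entry2 (res : List (List Int)) (i j : Nat) : Int := (res.getD i []).getD j 0

-- abstract form of A's inner-loop body
def stepA (heights : List (List Int)) (p : Nat × Nat) (st : List (List Int) × Int) :
    List (List Int) × Int :=
  (set2d st.1 p.1 p.2 st.2, max st.2 (entry2 heights p.1 p.2))

theorem innerA_eq_step (heights : List (List Int)) (edge : String) (m n i1 : Nat) :
    innerA heights edge m n i1 = fun st i2 => stepA heights (idxA edge m n i1 i2) st := rfl

theorem set2d_length (res : List (List Int)) (i j : Nat) (v : Int) :
    (set2d res i j v).length = res.length := by simp [set2d]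

theorem getD_set2d_rowlen (res : List (List Int)) (i j : Nat) (v : Int) (i' : Nat) :
    ((set2d res i j v).getD i' []).length = (res.getD i' []).length := by
  simp only [set2d, List.getD]
  rcases Nat.lt_or_ge i res.length with hi | hi
  · by_cases h : i = i'
    · subst h; simp [List.getElem?_set_self hi, List.getElem?_eq_getElem hi]
    · simp [List.getElem?_set_ne h]
  · rw [List.set_eq_of_length_le hi]

theorem entry2_set2d_ne (res : List (List Int)) (i j : Nat) (v : Int) (i' j' : Nat)
    (h : (i, j) ≠ (i', j')) : entry2 (set2d res i j v) i' j' = entry2 res i' j' := by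
  simp only [entry2, set2d, List.getD]
  by_cases hi : i = i'
  · subst hi
    have hj : j ≠ j' := by intro hj; exact h (by rw [hj])
    rcases Nat.lt_or_ge i res.length with hlt | hge
    · simp [List.getElem?_set_self hlt, List.getElem?_eq_getElem hlt, List.getElem?_set_ne hj]
    · rw [List.set_eq_of_length_le hge]
  · simp [List.getElem?_set_ne hi]

theorem entry2_set2d_self (res : List (List Int)) (i j : Nat) (v : Int)
    (hi : i < res.length) (hj : j < (res.getD i []).length) :
    entry2 (set2d res i j v) i j = v := by
  have hj' : j < res[i].length := by
    simpa [List.getD, List.getElem?_eq_getElem hi] using hj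
  simp only [entry2, set2d, List.getD, List.getElem?_set_self hi,
    List.getElem?_eq_getElem hi, Option.getD_some]
  rw [List.getElem?_set_self hj']
  rfl

theorem fold_line (heights : List (List Int)) (p : Nat → Nat × Nat) :
    ∀ (k : Nat) (res : List (List Int)) (c : Int),
    (((List.range k).foldl (fun st s => stepA heights (p s) st) (res, c)).2
       = (List.range k).foldl (fun a s => max a (entry2 heights (p s).1 (p s).2)) c)
    ∧ (((List.range k).foldl (fun st s => stepA heights (p s) st) (res, c)).1.length = res.length)
    ∧ (∀ i, ((((List.range k).foldl (fun st s => stepA heights (p s) st) (res, c)).1).getD i []).length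
         = (res.getD i []).length)
    ∧ (∀ i j, (∀ s, s < k → p s ≠ (i, j)) →
        entry2 ((List.range k).foldl (fun st s => stepA heights (p s) st) (res, c)).1 i j
          = entry2 res i j)
    ∧ (∀ s, s < k → (∀ s', s < s' → s' < k → p s' ≠ p s) →
        (p s).1 < res.length → (p s).2 < (res.getD (p s).1 []).length →
        entry2 ((List.range k).foldl (fun st s => stepA heights (p s) st) (res, c)).1 (p s).1 (p s).2
          = (List.range s).foldl (fun a s' => max a (entry2 heights (p s').1 (p s').2)) c) := by
  intro k
  induction k with
  | zero => intro res c; simp [List.range_zero]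
  | succ k ih =>
    intro res c
    obtain ⟨ih2, ihlen, ihrow, ihne, ihself⟩ := ih res c
    set F := (List.range k).foldl (fun st s => stepA heights (p s) st) (res, c) with hF
    have hstep : (List.range (k+1)).foldl (fun st s => stepA heights (p s) st) (res, c)
        = stepA heights (p k) F := by
      rw [List.range_succ, List.foldl_append]; rfl
    have hstep2 : (List.range (k+1)).foldl (fun a s => max a (entry2 heights (p s).1 (p s).2)) c
        = max (F.2) (entry2 heights (p k).1 (p k).2) := by
      rw [List.range_succ, List.foldl_append, ih2]; rfl
    refine ⟨?_, ?_, ?_, ?_, ?_⟩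
    · rw [hstep, hstep2]; rfl
    · rw [hstep]; simpa [stepA, set2d_length] using ihlen
    · intro i; rw [hstep]
      show ((set2d F.1 (p k).1 (p k).2 F.2).getD i []).length = _
      rw [getD_set2d_rowlen]; exact ihrow i
    · intro i j hnot
      rw [hstep]
      have h1 : entry2 (stepA heights (p k) F).1 i j = entry2 F.1 i j :=
        entry2_set2d_ne _ _ _ _ _ _ (hnot k (Nat.lt_succ_self k))
      rw [h1]; exact ihne i j (fun s hs => hnot s (Nat.lt_succ_of_lt hs))
    · intro s hs hdist hri hrj
      rw [hstep]
      rcases Nat.lt_or_ge s k with hlt | hge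
      · have hpk : p k ≠ p s := hdist k hlt (Nat.lt_succ_self k)
        have h1 : entry2 (stepA heights (p k) F).1 (p s).1 (p s).2 = entry2 F.1 (p s).1 (p s).2 := by
          apply entry2_set2d_ne
          intro h; exact hpk (Prod.ext (congrArg Prod.fst h) (congrArg Prod.snd h))
        rw [h1]
        exact ihself s hlt (fun s' h1 h2 => hdist s' h1 (Nat.lt_succ_of_lt h2)) hri hrj
      · have hsk : s = k := Nat.le_antisymm (Nat.lt_succ_iff.mp hs) hge
        subst hsk
        have h1 : entry2 (stepA heights (p s) F).1 (p s).1 (p s).2 = F.2 := by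
          apply entry2_set2d_self
          · rw [ihlen]; exact hri
          · rw [ihrow]; exact hrj
        rw [h1, ih2]
theorem fold_grid (heights : List (List Int)) (P : Nat → Nat → Nat × Nat) (k2 : Nat) :
    ∀ (k1 : Nat) (res : List (List Int)),
    (((List.range k1).foldl
        (fun r i1 => ((List.range k2).foldl (fun st s => stepA heights (P i1 s) st) (r, -1)).1)
        res).length = res.length)
    ∧ (∀ i, (((List.range k1).foldl
        (fun r i1 => ((List.range k2).foldl (fun st s => stepA heights (P i1 s) st) (r, -1)).1)
        res).getD i []).length = (res.getD i []).length)
    ∧ (∀ i1 s, i1 < k1 → s < k2 →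
        (∀ i1' s', i1' < k1 → s' < k2 → (i1 < i1' ∨ (i1 = i1' ∧ s < s')) → P i1' s' ≠ P i1 s) →
        (P i1 s).1 < res.length → (P i1 s).2 < (res.getD (P i1 s).1 []).length →
        entry2 ((List.range k1).foldl
          (fun r i1 => ((List.range k2).foldl (fun st s => stepA heights (P i1 s) st) (r, -1)).1)
          res) (P i1 s).1 (P i1 s).2
          = (List.range s).foldl (fun a s' => max a (entry2 heights (P i1 s').1 (P i1 s').2)) (-1)) := by
  intro k1
  induction k1 with
  | zero => intro res; simp [List.range_zero]
  | succ k1 ih =>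
    intro res
    obtain ⟨ihlen, ihrow, ihentry⟩ := ih res
    set G := (List.range k1).foldl
        (fun r i1 => ((List.range k2).foldl (fun st s => stepA heights (P i1 s) st) (r, -1)).1)
        res with hG
    have hstep : (List.range (k1+1)).foldl
        (fun r i1 => ((List.range k2).foldl (fun st s => stepA heights (P i1 s) st) (r, -1)).1) res
        = ((List.range k2).foldl (fun st s => stepA heights (P k1 s) st) (G, -1)).1 := by
      rw [List.range_succ, List.foldl_append]; rfl
    obtain ⟨l2, llen, lrow, lne, lself⟩ := fold_line heights (P k1) k2 G (-1)
    refine ⟨?_, ?_, ?_⟩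
    · rw [hstep, llen, ihlen]
    · intro i; rw [hstep, lrow, ihrow]
    · intro i1 s hi1 hs huniq hri hrj
      rcases Nat.lt_or_ge i1 k1 with hlt | hge
      · rw [hstep]
        have hne : ∀ s', s' < k2 → P k1 s' ≠ ((P i1 s).1, (P i1 s).2) := by
          intro s' hs' h
          exact huniq k1 s' (Nat.lt_succ_self k1) hs' (Or.inl hlt) (by rw [h])
        rw [lne _ _ hne]
        exact ihentry i1 s hlt hs
          (fun i1' s' h1 h2 h3 => huniq i1' s' (Nat.lt_succ_of_lt h1) h2 h3) hri hrj
      · have hk : i1 = k1 := Nat.le_antisymm (Nat.lt_succ_iff.mp hi1) hge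
        subst hk
        rw [hstep]
        apply lself s hs
        · intro s' h1 h2
          exact huniq i1 s' (Nat.lt_succ_self i1) h2 (Or.inr ⟨rfl, h1⟩)
        · rw [ihlen]; exact hri
        · rw [ihrow]; exact hrj
-- generic shape of the two B scans
theorem scan_shape {α β : Type} (f : β → α → β) :
    ∀ (l : List α) (acc : List β) (c : β),
    (l.foldl (fun a x => (a.1 ++ [a.2], f a.2 x)) (acc, c)).1
      = acc ++ (List.range l.length).map (fun s => (l.take s).foldl f c) := by
  intro l
  induction l with
  | nil => intro acc c; simp
  | cons x l ih =>
    intro acc c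
    simp only [List.foldl_cons, List.length_cons, List.range_succ_eq_map]
    rw [ih]
    simp [List.append_assoc, Function.comp]

theorem scanB_eq (row : List Int) :
    scanB row = (List.range row.length).map (fun s => (row.take s).foldl max (-1)) := by
  unfold scanB; rw [scan_shape]; simp

theorem sweepB_eq (g : List (List Int)) (n : Nat) :
    sweepB g n = (List.range g.length).map
      (fun s => (g.take s).foldl (fun c r => List.zipWith max c r) (List.replicate n (-1))) := by
  unfold sweepB; rw [scan_shape]; simp

theorem take_eq_range_map {α : Type} (l : List α) (d : α) (i : Nat) (h : i ≤ l.length) :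
    l.take i = (List.range i).map (fun s => l.getD s d) := by
  apply List.ext_getElem
  · simp [Nat.min_eq_left h]
  · intro k h1 h2
    simp only [List.length_take] at h1
    have hk : k < l.length := lt_of_lt_of_le (lt_min_iff.mp h1).1 (le_refl _) |>.trans_le h
    simp [List.getElem_take, List.getElem?_eq_getElem hk]

theorem foldl_zip_length (n : Nat) :
    ∀ (l : List (List Int)) (c : List Int), c.length = n → (∀ r ∈ l, r.length = n) →
    (l.foldl (fun c r => List.zipWith max c r) c).length = n := by
  intro l
  induction l with
  | nil => intro c hc _; simpa using hc
  | cons r l ih =>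
    intro c hc hr
    simp only [List.foldl_cons]
    exact ih _ (by simp [hc, hr r List.mem_cons_self]) (fun r' h => hr r' (List.mem_cons_of_mem _ h))

theorem foldl_zip_getD (n j : Nat) (hj : j < n) :
    ∀ (l : List (List Int)) (c : List Int), c.length = n → (∀ r ∈ l, r.length = n) →
    (l.foldl (fun c r => List.zipWith max c r) c).getD j 0
      = l.foldl (fun a r => max a (r.getD j 0)) (c.getD j 0) := by
  intro l
  induction l with
  | nil => intro c _ _; rfl
  | cons r l ih =>
    intro c hc hr
    have hrn : r.length = n := hr r List.mem_cons_self
    simp only [List.foldl_cons]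
    rw [ih _ (by simp [hc, hrn]) (fun r' h => hr r' (List.mem_cons_of_mem _ h))]
    congr 1
    have hjc : j < c.length := hc ▸ hj
    have hjr : j < r.length := hrn ▸ hj
    have hjz : j < (List.zipWith max c r).length := by simp [hc, hrn, hj]
    rw [List.getD_eq_getElem _ _ hjz, List.getD_eq_getElem _ _ hjc, List.getD_eq_getElem _ _ hjr,
      List.getElem_zipWith]
theorem A_closed (heights : List (List Int)) (P : Nat → Nat → Nat × Nat) (k1 k2 m n : Nat)
    (res0 : List (List Int)) (hlen : res0.length = m)
    (hrow : ∀ i, i < m → (res0.getD i []).length = n)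
    (hinj : ∀ i1 s i1' s', i1 < k1 → s < k2 → i1' < k1 → s' < k2 → P i1' s' = P i1 s → i1' = i1 ∧ s' = s)
    (hrange : ∀ i1 s, i1 < k1 → s < k2 → (P i1 s).1 < m ∧ (P i1 s).2 < n) :
    (((List.range k1).foldl
        (fun r i1 => ((List.range k2).foldl (fun st s => stepA heights (P i1 s) st) (r, -1)).1)
        res0).length = m)
    ∧ (∀ i, i < m → (((List.range k1).foldl
        (fun r i1 => ((List.range k2).foldl (fun st s => stepA heights (P i1 s) st) (r, -1)).1)
        res0).getD i []).length = n)
    ∧ (∀ i1 s, i1 < k1 → s < k2 →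
        entry2 ((List.range k1).foldl
          (fun r i1 => ((List.range k2).foldl (fun st s => stepA heights (P i1 s) st) (r, -1)).1)
          res0) (P i1 s).1 (P i1 s).2
          = (List.range s).foldl (fun a s' => max a (entry2 heights (P i1 s').1 (P i1 s').2)) (-1)) := by
  obtain ⟨h1, h2, h3⟩ := fold_grid heights P k2 k1 res0
  refine ⟨by rw [h1, hlen], fun i hi => by rw [h2 i, hrow i hi], ?_⟩
  intro i1 s hi1 hs
  apply h3 i1 s hi1 hs
  · intro i1' s' h1' h2' horder heq
    obtain ⟨e1, e2⟩ := hinj i1 s i1' s' hi1 hs h1' h2' heq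
    omega
  · rw [hlen]; exact (hrange i1 s hi1 hs).1
  · rw [hrow _ (hlen ▸ (hlen.symm ▸ (hrange i1 s hi1 hs).1))]; exact (hrange i1 s hi1 hs).2
theorem getD_take_eq (X : List Int) (n j : Nat) (hj : j < n) (hn : n ≤ X.length) :
    (X.take n).getD j 0 = X.getD j 0 := by
  have h1 : j < (X.take n).length := by simp; omega
  rw [List.getD_eq_getElem _ _ h1, List.getD_eq_getElem _ _ (by omega), List.getElem_take]

theorem eq_top (h : List (List Int))
    (hwid : ∀ row ∈ h, (h.headD []).length ≤ row.length) :
    partial_max h "top" = partial_max_alt h "top" := by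
  have hA : partial_max h "top"
      = (List.range (h.headD []).length).foldl
          (fun r i1 => ((List.range h.length).foldl
              (fun st s => stepA h ((fun (i1 s : Nat) => (s, i1)) i1 s) st) (r, -1)).1)
          (h.map (fun _ => List.replicate (h.headD []).length 0)) := by
    unfold partial_max
    simp only [innerA_eq_step, idxA]
    norm_num
  have hB : partial_max_alt h "top"
      = sweepB (h.map (fun row => row.take (h.headD []).length)) (h.headD []).length := by
    unfold partial_max_alt
    norm_num
  rw [hA, hB]
  generalize hn : (h.headD []).length = n at hwid ⊢
  generalize hm : h.length = m
  set g := h.map (fun row => row.take n) with hg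
  set res0 := h.map (fun _ => List.replicate n (0 : Int)) with hres0
  have hglen : g.length = m := by simp [hg, hm]
  have hgrow : ∀ r ∈ g, r.length = n := by
    intro r hr
    rw [hg] at hr
    obtain ⟨row, hrow, rfl⟩ := List.mem_map.mp hr
    simp [Nat.min_eq_left (hwid row hrow)]
  have hgget : ∀ s, s < m → g.getD s [] = (h.getD s []).take n := by
    intro s hs
    rw [List.getD_eq_getElem _ _ (by omega : s < g.length),
        List.getD_eq_getElem _ _ (by omega : s < h.length)]
    simp [hg]
  have hr0len : res0.length = m := by simp [hres0, hm]
  have hr0get : ∀ i, i < m → res0.getD i [] = List.replicate n 0 := by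
    intro i hi
    rw [List.getD_eq_getElem _ _ (by omega : i < res0.length)]
    simp [hres0]
  obtain ⟨hAlen, hArow, hAentry⟩ := A_closed h (fun i1 s => (s, i1)) n m m n res0 hr0len
    (fun i hi => by rw [hr0get i hi]; simp)
    (by intro i1 s i1' s' _ _ _ _ heq
        simp only [Prod.mk.injEq] at heq
        exact ⟨heq.2, heq.1⟩)
    (by intro i1 s hi1 hs; exact ⟨hs, hi1⟩)
  rw [sweepB_eq]
  apply List.ext_getElem
  · rw [hAlen]; simp [hglen]
  · intro i hi1 hi2
    have him : i < m := by rw [hAlen] at hi1; exact hi1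
    have hBrow : ((List.range g.length).map
        (fun s => (g.take s).foldl (fun c r => List.zipWith max c r) (List.replicate n (-1))))[i]'(by simpa using hi2)
        = (g.take i).foldl (fun c r => List.zipWith max c r) (List.replicate n (-1)) := by
      simp
    rw [hBrow]
    apply List.ext_getElem
    · rw [← List.getD_eq_getElem _ ([] : List Int) hi1, hArow i him]
      rw [foldl_zip_length n _ _ (by simp) (fun r hr => hgrow r (List.mem_of_mem_take hr))]
    · intro j hj1 hj2
      have hjn : j < n := by
        rw [foldl_zip_length n _ _ (by simp) (fun r hr => hgrow r (List.mem_of_mem_take hr))] at hj2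
        exact hj2
      -- A entry
      have hAe : ((((List.range n).foldl
          (fun r i1 => ((List.range m).foldl
              (fun st s => stepA h ((fun (i1 s : Nat) => (s, i1)) i1 s) st) (r, -1)).1)
          res0)[i]'hi1)[j]'hj1)
          = (List.range i).foldl (fun a s' => max a (entry2 h s' j)) (-1) := by
        rw [← List.getD_eq_getElem _ (0 : Int) hj1, ← List.getD_eq_getElem _ ([] : List Int) hi1]
        exact hAentry j i hjn him
      rw [hAe, ← List.getD_eq_getElem _ (0 : Int) hj2]
      rw [foldl_zip_getD n j hjn _ _ (by simp) (fun r hr => hgrow r (List.mem_of_mem_take hr))]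
      rw [take_eq_range_map g [] i (by omega), List.foldl_map]
      have hrepl : (List.replicate n (-1 : Int)).getD j 0 = -1 := by
        rw [List.getD_eq_getElem _ _ (by simpa using hjn)]; simp
      rw [hrepl]
      apply PySem.List.foldl_congr_mem
      intro a s hs
      have hsm : s < m := by have := List.mem_range.mp hs; omega
      rw [hgget s hsm, getD_take_eq _ n j hjn]
      · rfl
      · have hsh : s < h.length := by omega
        have := hwid (h.getD s []) (by rw [List.getD_eq_getElem _ _ hsh]; exact List.getElem_mem hsh)
        omega
theorem eq_left (h : List (List Int))
    (hwid : ∀ row ∈ h, (h.headD []).length ≤ row.length) :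
    partial_max h "left" = partial_max_alt h "left" := by
  have hA : partial_max h "left"
      = (List.range h.length).foldl
          (fun r i1 => ((List.range (h.headD []).length).foldl
              (fun st s => stepA h ((fun (i1 s : Nat) => (i1, s)) i1 s) st) (r, -1)).1)
          (h.map (fun _ => List.replicate (h.headD []).length 0)) := by
    unfold partial_max
    simp only [innerA_eq_step, idxA]
    simp
  have hB : partial_max_alt h "left"
      = (h.map (fun row => row.take (h.headD []).length)).map scanB := by
    unfold partial_max_alt
    simp
  rw [hA, hB]
  generalize hn : (h.headD []).length = n at hwid ⊢
  generalize hm : h.length = m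
  set g := h.map (fun row => row.take n) with hg
  set res0 := h.map (fun _ => List.replicate n (0 : Int)) with hres0
  have hglen : g.length = m := by simp [hg, hm]
  have hgget : ∀ s, s < m → g.getD s [] = (h.getD s []).take n := by
    intro s hs
    rw [List.getD_eq_getElem _ _ (by omega : s < g.length),
        List.getD_eq_getElem _ _ (by omega : s < h.length)]
    simp [hg]
  have hglen2 : ∀ s, s < m → (g.getD s []).length = n := by
    intro s hs
    rw [hgget s hs]
    have hsh : s < h.length := by omega
    have := hwid (h.getD s []) (by rw [List.getD_eq_getElem _ _ hsh]; exact List.getElem_mem hsh)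
    simp [List.getD] at this ⊢; omega
  have hr0len : res0.length = m := by simp [hres0, hm]
  have hr0get : ∀ i, i < m → res0.getD i [] = List.replicate n 0 := by
    intro i hi
    rw [List.getD_eq_getElem _ _ (by omega : i < res0.length)]
    simp [hres0]
  obtain ⟨hAlen, hArow, hAentry⟩ := A_closed h (fun i1 s => (i1, s)) m n m n res0 hr0len
    (fun i hi => by rw [hr0get i hi]; simp)
    (by intro i1 s i1' s' _ _ _ _ heq
        simp only [Prod.mk.injEq] at heq
        exact ⟨heq.1, heq.2⟩)
    (by intro i1 s hi1 hs; exact ⟨hi1, hs⟩)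
  apply List.ext_getElem
  · rw [hAlen]; simp [hglen]
  · intro i hi1 hi2
    have him : i < m := by rw [hAlen] at hi1; exact hi1
    have hBrow : ((g.map scanB))[i]'(by simpa using hi2) = scanB (g.getD i []) := by
      rw [List.getElem_map, List.getD_eq_getElem _ _ (by omega : i < g.length)]
    rw [hBrow, scanB_eq, hglen2 i him]
    apply List.ext_getElem
    · rw [← List.getD_eq_getElem _ ([] : List Int) hi1, hArow i him]; simp
    · intro j hj1 hj2
      have hjn : j < n := by simpa using hj2
      have hAe : ((((List.range m).foldl
          (fun r i1 => ((List.range n).foldl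
              (fun st s => stepA h ((fun (i1 s : Nat) => (i1, s)) i1 s) st) (r, -1)).1)
          res0)[i]'hi1)[j]'hj1)
          = (List.range j).foldl (fun a s' => max a (entry2 h i s')) (-1) := by
        rw [← List.getD_eq_getElem _ (0 : Int) hj1, ← List.getD_eq_getElem _ ([] : List Int) hi1]
        exact hAentry i j him hjn
      rw [hAe]
      rw [List.getElem_map, List.getElem_range]
      rw [take_eq_range_map (g.getD i []) (0 : Int) j (by rw [hglen2 i him]; omega),
        List.foldl_map]
      apply PySem.List.foldl_congr_mem
      intro a s hs
      have hsn : s < n := by have := List.mem_range.mp hs; omega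
      rw [hgget i him, getD_take_eq _ n s hsn]
      · rfl
      · have hih : i < h.length := by omega
        have := hwid (h.getD i []) (by rw [List.getD_eq_getElem _ _ hih]; exact List.getElem_mem hih)
        omega
theorem eq_bottom (h : List (List Int))
    (hwid : ∀ row ∈ h, (h.headD []).length ≤ row.length) :
    partial_max h "bottom" = partial_max_alt h "bottom" := by
  have hA : partial_max h "bottom"
      = (List.range (h.headD []).length).foldl
          (fun r i1 => ((List.range h.length).foldl
              (fun st s => stepA h (h.length - s - 1, i1) st) (r, -1)).1)
          (h.map (fun _ => List.replicate (h.headD []).length 0)) := by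
    unfold partial_max
    simp only [innerA_eq_step, idxA]
    simp
  have hB : partial_max_alt h "bottom"
      = (sweepB (h.map (fun row => row.take (h.headD []).length)).reverse
          (h.headD []).length).reverse := by
    unfold partial_max_alt
    simp
  rw [hA, hB]
  generalize hn : (h.headD []).length = n at hwid ⊢
  generalize hm : h.length = m
  set g := h.map (fun row => row.take n) with hg
  set res0 := h.map (fun _ => List.replicate n (0 : Int)) with hres0
  have hglen : g.length = m := by simp [hg, hm]
  have hgrow : ∀ r ∈ g, r.length = n := by
    intro r hr
    rw [hg] at hr
    obtain ⟨row, hrow, rfl⟩ := List.mem_map.mp hr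
    simp [Nat.min_eq_left (hwid row hrow)]
  have hgget : ∀ s, s < m → g.getD s [] = (h.getD s []).take n := by
    intro s hs
    rw [List.getD_eq_getElem _ _ (by omega : s < g.length),
        List.getD_eq_getElem _ _ (by omega : s < h.length)]
    simp [hg]
  have hrevget : ∀ s, s < m → g.reverse.getD s [] = g.getD (m - 1 - s) [] := by
    intro s hs
    rw [List.getD_eq_getElem _ _ (by simpa [hglen] using hs),
        List.getD_eq_getElem _ _ (by omega : m - 1 - s < g.length),
        List.getElem_reverse]
    simp only [hglen]
  have hr0len : res0.length = m := by simp [hres0, hm]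
  have hr0get : ∀ i, i < m → res0.getD i [] = List.replicate n 0 := by
    intro i hi
    rw [List.getD_eq_getElem _ _ (by omega : i < res0.length)]
    simp [hres0]
  obtain ⟨hAlen, hArow, hAentry⟩ := A_closed h (fun i1 s => (m - s - 1, i1)) n m m n res0 hr0len
    (fun i hi => by rw [hr0get i hi]; simp)
    (by intro i1 s i1' s' _ hs _ hs' heq
        simp only [Prod.mk.injEq] at heq
        exact ⟨heq.2, by omega⟩)
    (by intro i1 s hi1 hs; exact ⟨by show m - s - 1 < m; omega, hi1⟩)
  simp only at hAlen hArow hAentry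
  apply List.ext_getElem
  · rw [hAlen]; simp [sweepB_eq, hglen]
  · intro i hi1 hi2
    have him : i < m := by rw [hAlen] at hi1; exact hi1
    have hBrow : ((sweepB g.reverse n).reverse)[i]'hi2
        = (g.reverse.take (m - 1 - i)).foldl (fun c r => List.zipWith max c r)
            (List.replicate n (-1)) := by
      rw [List.getElem_reverse]
      simp only [sweepB_eq, List.length_map, List.length_range, List.length_reverse, hglen]
      rw [List.getElem_map, List.getElem_range]
    rw [hBrow]
    have hrowmem : ∀ r ∈ g.reverse.take (m - 1 - i), r.length = n :=
      fun r hr => hgrow r (List.mem_reverse.mp (List.mem_of_mem_take hr))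
    apply List.ext_getElem
    · rw [← List.getD_eq_getElem _ ([] : List Int) hi1, hArow i him,
        foldl_zip_length n _ _ (by simp) hrowmem]
    · intro j hj1 hj2
      have hjn : j < n := by
        rw [foldl_zip_length n _ _ (by simp) hrowmem] at hj2
        exact hj2
      have hAe := hAentry j (m - 1 - i) hjn (by omega)
      simp only at hAe
      have hPi : m - (m - 1 - i) - 1 = i := by omega
      rw [hPi] at hAe
      simp only [entry2] at hAe
      rw [← List.getD_eq_getElem _ (0 : Int) hj1, ← List.getD_eq_getElem _ ([] : List Int) hi1,
        hAe, ← List.getD_eq_getElem _ (0 : Int) hj2]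
      rw [foldl_zip_getD n j hjn _ _ (by simp) hrowmem]
      rw [take_eq_range_map g.reverse [] (m - 1 - i) (by simp [hglen]; omega), List.foldl_map]
      have hrepl : (List.replicate n (-1 : Int)).getD j 0 = -1 := by
        rw [List.getD_eq_getElem _ _ (by simpa using hjn)]; simp
      rw [hrepl]
      apply PySem.List.foldl_congr_mem
      intro a s hs
      have hsm : s < m - 1 - i := List.mem_range.mp hs
      have hsub : m - s - 1 = m - 1 - s := by omega
      have hih : m - 1 - s < h.length := by omega
      have hwle : n ≤ (h.getD (m - 1 - s) []).length := by
        have := hwid (h.getD (m - 1 - s) [])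
          (by rw [List.getD_eq_getElem _ _ hih]; exact List.getElem_mem hih)
        omega
      rw [hrevget s (by omega), hgget (m - 1 - s) (by omega), getD_take_eq _ n j hjn hwle, hsub]
theorem scanB_length (row : List Int) : (scanB row).length = row.length := by
  rw [scanB_eq]; simp

theorem eq_right (h : List (List Int))
    (hwid : ∀ row ∈ h, (h.headD []).length ≤ row.length) :
    partial_max h "right" = partial_max_alt h "right" := by
  have hA : partial_max h "right"
      = (List.range h.length).foldl
          (fun r i1 => ((List.range (h.headD []).length).foldl
              (fun st s => stepA h (i1, (h.headD []).length - s - 1) st) (r, -1)).1)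
          (h.map (fun _ => List.replicate (h.headD []).length 0)) := by
    unfold partial_max
    simp only [innerA_eq_step, idxA]
    simp
  have hB : partial_max_alt h "right"
      = (h.map (fun row => row.take (h.headD []).length)).map
          (fun row => (scanB row.reverse).reverse) := by
    unfold partial_max_alt
    simp
  rw [hA, hB]
  generalize hn : (h.headD []).length = n at hwid ⊢
  generalize hm : h.length = m
  set g := h.map (fun row => row.take n) with hg
  set res0 := h.map (fun _ => List.replicate n (0 : Int)) with hres0
  have hglen : g.length = m := by simp [hg, hm]
  have hgget : ∀ s, s < m → g.getD s [] = (h.getD s []).take n := by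
    intro s hs
    rw [List.getD_eq_getElem _ _ (by omega : s < g.length),
        List.getD_eq_getElem _ _ (by omega : s < h.length)]
    simp [hg]
  have hglen2 : ∀ s, s < m → (g.getD s []).length = n := by
    intro s hs
    rw [hgget s hs]
    have hsh : s < h.length := by omega
    have := hwid (h.getD s []) (by rw [List.getD_eq_getElem _ _ hsh]; exact List.getElem_mem hsh)
    simp [List.getD] at this ⊢; omega
  have hr0len : res0.length = m := by simp [hres0, hm]
  have hr0get : ∀ i, i < m → res0.getD i [] = List.replicate n 0 := by
    intro i hi
    rw [List.getD_eq_getElem _ _ (by omega : i < res0.length)]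
    simp [hres0]
  obtain ⟨hAlen, hArow, hAentry⟩ := A_closed h (fun i1 s => (i1, n - s - 1)) m n m n res0 hr0len
    (fun i hi => by rw [hr0get i hi]; simp)
    (by intro i1 s i1' s' _ hs _ hs' heq
        simp only [Prod.mk.injEq] at heq
        exact ⟨heq.1, by omega⟩)
    (by intro i1 s hi1 hs; exact ⟨hi1, by show n - s - 1 < n; omega⟩)
  simp only at hAlen hArow hAentry
  apply List.ext_getElem
  · rw [hAlen]; simp [hglen]
  · intro i hi1 hi2
    have him : i < m := by rw [hAlen] at hi1; exact hi1
    have hBrow : ((g.map (fun row => (scanB row.reverse).reverse)))[i]'(by simpa using hi2)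
        = (scanB (g.getD i []).reverse).reverse := by
      rw [List.getElem_map, List.getD_eq_getElem _ _ (by omega : i < g.length)]
    rw [hBrow]
    have hrn : (g.getD i []).length = n := hglen2 i him
    apply List.ext_getElem
    · rw [← List.getD_eq_getElem _ ([] : List Int) hi1, hArow i him,
        List.length_reverse, scanB_length, List.length_reverse, hrn]
    · intro j hj1 hj2
      have hjn : j < n := by
        rw [List.length_reverse, scanB_length, List.length_reverse, hrn] at hj2
        exact hj2
      have hAe := hAentry i (n - 1 - j) him (by omega)
      have hPj : n - (n - 1 - j) - 1 = j := by omega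
      rw [hPj] at hAe
      simp only [entry2] at hAe
      rw [← List.getD_eq_getElem _ (0 : Int) hj1, ← List.getD_eq_getElem _ ([] : List Int) hi1,
        hAe]
      have hBe : ((scanB (g.getD i []).reverse).reverse)[j]'hj2
          = ((g.getD i []).reverse.take (n - 1 - j)).foldl max (-1) := by
        rw [List.getElem_reverse]
        simp only [scanB_eq, List.length_map, List.length_range, List.length_reverse, hrn]
        rw [List.getElem_map, List.getElem_range]
      rw [hBe]
      rw [take_eq_range_map (g.getD i []).reverse (0 : Int) (n - 1 - j)
            (by rw [List.length_reverse, hrn]; omega), List.foldl_map]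
      apply PySem.List.foldl_congr_mem
      intro a s hs
      have hsn : s < n - 1 - j := List.mem_range.mp hs
      have hsub : n - s - 1 = n - 1 - s := by omega
      have hrev : (g.getD i []).reverse.getD s 0 = (g.getD i []).getD (n - 1 - s) 0 := by
        rw [List.getD_eq_getElem _ _ (by rw [List.length_reverse, hrn]; omega),
            List.getD_eq_getElem _ _ (by rw [hrn]; omega : n - 1 - s < (g.getD i []).length),
            List.getElem_reverse]
        simp only [hrn]
      have hih : i < h.length := by omega
      have hwle : n ≤ (h.getD i []).length := by
        have := hwid (h.getD i []) (by rw [List.getD_eq_getElem _ _ hih]; exact List.getElem_mem hih)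
        omega
      rw [hrev, hgget i him, getD_take_eq _ n (n - 1 - s) (by omega) hwle, hsub]

-- ===== VERDICT (by name: the statement is the Claim_ definition above) =====
theorem partial_max_spec : Claim_equal_partial_max := by
  intro h e _ hpre
  obtain ⟨hne, hwid, hedge⟩ := hpre
  unfold Spec_partial_max
  rcases hedge with rfl | rfl | rfl | rfl
  · exact eq_top h hwid
  · exact eq_bottom h hwid
  · exact eq_left h hwid
  · exact eq_right h hwid
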